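-- pv_equiv track=rewrite | github.com/MangoNrFive/advent-of-code | 2023/14/02.py | tilt_column
-- ===== SOURCE A (Python) =====
-- def tilt_column(column, reverse=False):
-- 	if reverse:
-- 		column = reversed(column)
-- 	column_tilted = []
-- 	sub_column_tilted = []
-- 	for element in column:
-- 		if element == 2:
-- 			column_tilted += sub_column_tilted
-- 			sub_column_tilted = []
-- 			column_tilted.append(2)
-- 		elif element == 1:
-- 			sub_column_tilted.insert(0, 1)
-- 		elif element == 0:
-- 			sub_column_tilted.append(0)
-- 	if reverse:
-- 		return list(reversed(column_tilted + sub_column_tilted))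
-- 	return column_tilted + sub_column_tilted
-- ===== SOURCE B (Python) =====
-- def tilt_column(column, reverse=False):
-- 	seq = list(column)[::-1] if reverse else list(column)
-- 	# stage 1: split into 2-delimited segments
-- 	segments = []
-- 	current = []
-- 	for x in seq:
-- 		if x == 2:
-- 			segments.append(current)
-- 			current = []
-- 		else:
-- 			current.append(x)
-- 	segments.append(current)
-- 	# stage 2: tilt each segment by sorting its rocks/spaces descending (1s before 0s)
-- 	tilted = [sorted((x for x in seg if x in (0, 1)), reverse=True) for seg in segments]
-- 	# stage 3: join with the cube rocks (2) back in
-- 	out = tilted[0]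
-- 	for seg in tilted[1:]:
-- 		out += [2] + seg
-- 	return out[::-1] if reverse else out
-- ===== Notes on version B (the rewrite author's own statement) =====
-- stated objective: alternative
-- what changed: B replaces A's single streaming pass with buffered list surgery (insert(0,1)/append and flush on 2) by three staged passes: split the column into 2-delimited segments, tilt each segment with sorted(..., reverse=True), and join the segments back with 2s.
import Mathlib
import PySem

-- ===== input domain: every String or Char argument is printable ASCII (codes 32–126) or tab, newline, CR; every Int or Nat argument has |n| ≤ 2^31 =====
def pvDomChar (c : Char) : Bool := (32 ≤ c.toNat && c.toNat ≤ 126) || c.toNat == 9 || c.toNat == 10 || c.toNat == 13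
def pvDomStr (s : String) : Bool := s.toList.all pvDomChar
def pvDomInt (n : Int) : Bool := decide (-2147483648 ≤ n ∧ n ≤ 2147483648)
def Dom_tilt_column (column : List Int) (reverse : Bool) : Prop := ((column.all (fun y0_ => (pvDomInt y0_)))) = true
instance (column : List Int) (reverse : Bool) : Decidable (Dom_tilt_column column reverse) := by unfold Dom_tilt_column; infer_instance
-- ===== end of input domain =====

-- B tilts by staged passes — split on 2, sort each segment descending, rejoin —
-- instead of A's streaming flush with per-element list surgery (objective: alternative).

-- ===== PORT A =====
-- A's loop body: state = (column_tilted, sub_column_tilted)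
def tiltA_step (st : List Int × List Int) (element : Int) : List Int × List Int :=
  if element = 2 then (st.1 ++ st.2 ++ [2], [])
  else if element = 1 then (st.1, 1 :: st.2)
  else if element = 0 then (st.1, st.2 ++ [0])
  else st

def tilt_column (column : List Int) (reverse : Bool) : List Int :=
  let col := if reverse then column.reverse else column
  let st := col.foldl tiltA_step ([], [])
  if reverse then (st.1 ++ st.2).reverse else st.1 ++ st.2

-- ===== PORT B =====
-- stage 1 loop body: state = (segments, current)
def splitStep (st : List (List Int) × List Int) (x : Int) : List (List Int) × List Int :=
  if x = 2 then (st.1 ++ [st.2], []) else (st.1, st.2 ++ [x])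

-- stage 2: sorted((x for x in seg if x in (0,1)), reverse=True)
def tiltSeg (seg : List Int) : List Int :=
  PySem.List.sorted (seg.filter (fun x => x == 0 || x == 1)) (fun x => x) true

-- stage 3 loop: out = tilted[0]; for seg in tilted[1:]: out += [2] + seg
def joinWith2 : List (List Int) → List Int
  | [] => []
  | [s] => s
  | s :: rest => s ++ 2 :: joinWith2 rest

def tilt_column_alt (column : List Int) (reverse : Bool) : List Int :=
  let seq := if reverse then column.reverse else column
  let st := seq.foldl splitStep ([], [])
  let segments := st.1 ++ [st.2]
  let out := joinWith2 (segments.map tiltSeg)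
  if reverse then out.reverse else out

-- ===== PRECONDITION & SPEC =====
def Spec_tilt_column (column : List Int) (reverse : Bool) (out : List Int) : Prop := out = tilt_column_alt column reverse
instance (column : List Int) (reverse : Bool) (out : List Int) : Decidable (Spec_tilt_column column reverse out) := by unfold Spec_tilt_column; infer_instance

-- ===== CLAIM (what is proved, stated in full; the proofs are below) =====
def Claim_equal_tilt_column : Prop := ∀ (column : List Int) (reverse : Bool), Dom_tilt_column column reverse → Spec_tilt_column column reverse (tilt_column column reverse)

-- ===== LEMMAS AND PROOFS =====

-- canonical tilted segment: all 1s, then all 0s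
def canonSeg (ones zeros : Nat) : List Int :=
  List.replicate ones 1 ++ List.replicate zeros 0

-- the common recursive description both programs compute
def tiltGo : List Int → Nat → Nat → List Int
  | [], ones, zeros => canonSeg ones zeros
  | x :: rest, ones, zeros =>
    if x = 2 then canonSeg ones zeros ++ 2 :: tiltGo rest 0 0
    else if x = 1 then tiltGo rest (ones + 1) zeros
    else if x = 0 then tiltGo rest ones (zeros + 1)
    else tiltGo rest ones zeros

theorem canonSeg_pairwise (ones zeros : Nat) :
    (canonSeg ones zeros).Pairwise (fun a b : Int => b ≤ a) := by
  unfold canonSeg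
  rw [List.pairwise_append]
  refine ⟨?_, ?_, ?_⟩
  · exact List.pairwise_replicate.2 (Or.inr le_rfl)
  · exact List.pairwise_replicate.2 (Or.inr le_rfl)
  · intro a ha b hb
    rw [List.eq_of_mem_replicate ha, List.eq_of_mem_replicate hb]
    decide

theorem filter_perm_canon (s : List Int) :
    (s.filter (fun x => x == 0 || x == 1)).Perm (canonSeg (s.count 1) (s.count 0)) := by
  induction s with
  | nil => simp [canonSeg]
  | cons x rest ih =>
    by_cases h1 : x = 1
    · subst h1
      simpa [canonSeg, List.count_cons, List.replicate_succ] using ih.cons 1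
    · by_cases h0 : x = 0
      · subst h0
        have : canonSeg (rest.count 0 + 0) (rest.count 0) = canonSeg (rest.count 0) (rest.count 0) := rfl
        have step : ((0 : Int) :: (rest.filter (fun x => x == 0 || x == 1))).Perm
            (canonSeg (rest.count 1) (rest.count 0 + 1)) := by
          refine (ih.cons 0).trans ?_
          unfold canonSeg
          rw [List.replicate_succ]
          exact List.perm_middle.symm
        simpa [List.count_cons] using step
      · have hx : (x == 0 || x == 1) = false := by
          simp [h0, h1]
        simpa [List.filter_cons, hx, List.count_cons, h0, h1] using ih

theorem tiltSeg_eq_canon (s : List Int) :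
    tiltSeg s = canonSeg (s.count 1) (s.count 0) := by
  refine List.Perm.eq_of_pairwise (fun a b _ _ h1 h2 => le_antisymm h2 h1)
      (PySem.List.sorted_pairwise_rev _ _) (canonSeg_pairwise _ _)
      ((PySem.List.sorted_perm _ _ _).trans (filter_perm_canon s))

-- A's fold computes tiltGo
theorem foldA_eq_tiltGo (seq : List Int) (ct : List Int) (ones zeros : Nat) :
    (seq.foldl tiltA_step (ct, canonSeg ones zeros)).1
      ++ (seq.foldl tiltA_step (ct, canonSeg ones zeros)).2
    = ct ++ tiltGo seq ones zeros := by
  induction seq generalizing ct ones zeros with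
  | nil => simp [tiltGo]
  | cons x rest ih =>
    by_cases h2 : x = 2
    · subst h2
      have ha : tiltA_step (ct, canonSeg ones zeros) 2 =
          (ct ++ canonSeg ones zeros ++ [2], canonSeg 0 0) := by
        simp [tiltA_step, canonSeg]
      simp only [List.foldl_cons, ha, ih, tiltGo]
      simp [canonSeg]
    · by_cases h1 : x = 1
      · subst h1
        have ha : tiltA_step (ct, canonSeg ones zeros) 1 = (ct, canonSeg (ones + 1) zeros) := by
          simp [tiltA_step, canonSeg, List.replicate_succ]
        simp only [List.foldl_cons, ha, ih, tiltGo]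
        simp
      · by_cases h0 : x = 0
        · subst h0
          have ha : tiltA_step (ct, canonSeg ones zeros) 0 = (ct, canonSeg ones (zeros + 1)) := by
            simp [tiltA_step, canonSeg, List.replicate_succ']
          simp only [List.foldl_cons, ha, ih, tiltGo]
          simp
        · have ha : tiltA_step (ct, canonSeg ones zeros) x = (ct, canonSeg ones zeros) := by
            simp [tiltA_step, h0, h1, h2]
          simp only [List.foldl_cons, ha, ih, tiltGo]
          simp [h0, h1, h2]

theorem joinWith2_cons_ne (s : List Int) (l : List (List Int)) (h : l ≠ []) :
    joinWith2 (s :: l) = s ++ 2 :: joinWith2 l := by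
  cases l with
  | nil => exact absurd rfl h
  | cons _ _ => rfl

theorem joinWith2_merge (l : List (List Int)) (a t : List Int) :
    joinWith2 (l ++ [a, t]) = joinWith2 (l ++ [a ++ 2 :: t]) := by
  induction l with
  | nil => rfl
  | cons s rest ih =>
    rw [show (s :: rest) ++ [a, t] = s :: (rest ++ [a, t]) from rfl,
        joinWith2_cons_ne _ _ (by simp),
        show (s :: rest) ++ [a ++ 2 :: t] = s :: (rest ++ [a ++ 2 :: t]) from rfl,
        joinWith2_cons_ne _ _ (by simp), ih]

-- B's staged passes also compute tiltGo
theorem foldB_eq_tiltGo (seq : List Int) (segs : List (List Int)) (cur : List Int) :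
    joinWith2 (((seq.foldl splitStep (segs, cur)).1 ++ [(seq.foldl splitStep (segs, cur)).2]).map tiltSeg)
    = joinWith2 (segs.map tiltSeg ++ [tiltGo seq (cur.count 1) (cur.count 0)]) := by
  induction seq generalizing segs cur with
  | nil =>
    simp [tiltGo, tiltSeg_eq_canon]
  | cons x rest ih =>
    by_cases h2 : x = 2
    · subst h2
      have hs : splitStep (segs, cur) 2 = (segs ++ [cur], []) := by simp [splitStep]
      rw [List.foldl_cons, hs, ih]
      simp only [List.count_nil, List.map_append, List.map_cons, List.map_nil,
        List.append_assoc, List.cons_append, List.nil_append]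
      rw [joinWith2_merge, tiltSeg_eq_canon]
      simp [tiltGo]
    · have hs : splitStep (segs, cur) x = (segs, cur ++ [x]) := by simp [splitStep, h2]
      rw [List.foldl_cons, hs, ih]
      by_cases h1 : x = 1
      · subst h1; simp [tiltGo, List.count_append]
      · by_cases h0 : x = 0
        · subst h0; simp [tiltGo, List.count_append]
        · simp [tiltGo, List.count_append, h0, h1, h2]

-- ===== VERDICT (by name: the statement is the Claim_ definition above) =====
theorem tilt_column_spec : Claim_equal_tilt_column := by
  intro column reverse _
  unfold Spec_tilt_column tilt_column tilt_column_alt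
  have hA := foldA_eq_tiltGo (if reverse then column.reverse else column) [] 0 0
  have hB := foldB_eq_tiltGo (if reverse then column.reverse else column) [] []
  simp only [canonSeg, List.replicate, List.append_nil, List.nil_append, List.map_nil,
    List.count_nil] at hA hB
  simp only []
  rw [hA, hB]
  rfl
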